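-- pv_equiv track=rewrite | github.com/sadwatersya/hord | main.py | format_results_in_columns
-- ===== SOURCE A (Python) =====
-- def format_results_in_columns(results, numbers_per_column=5):
--     # Разделяем результаты на группы по 5 чисел
--     chunks = [results[i:i + numbers_per_column] for i in range(0, len(results), numbers_per_column)]
--
--     # Формируем строки для каждого столбца
--     formatted_results = []
--     for i in range(numbers_per_column):
--         column = []
--         for chunk in chunks:
--             if i < len(chunk):  # Проверяем, чтобы не выйти за пределы списка
--                 column.append(chunk[i])
--         formatted_results.append("   ".join(column))  # Разделяем числа тремя пробелами
--
--     # Объединяем строки с переносами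
--     return "\n".join(formatted_results)
-- ===== SOURCE B (Python) =====
-- def format_results_in_columns(results, numbers_per_column=5):
--     # Each output row i is the strided slice results[i::numbers_per_column]:
--     # no intermediate chunks list, the transposed columns are read off directly.
--     rows = ["   ".join(results[i::numbers_per_column])
--             for i in range(numbers_per_column)]
--     return "\n".join(rows)
-- ===== Notes on version B (the rewrite author's own statement) =====
-- stated objective: idiomatic
-- what changed: Replaces the chunk-then-transpose double loop with a direct strided slice results[i::numbers_per_column] per output row.
import Mathlib
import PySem

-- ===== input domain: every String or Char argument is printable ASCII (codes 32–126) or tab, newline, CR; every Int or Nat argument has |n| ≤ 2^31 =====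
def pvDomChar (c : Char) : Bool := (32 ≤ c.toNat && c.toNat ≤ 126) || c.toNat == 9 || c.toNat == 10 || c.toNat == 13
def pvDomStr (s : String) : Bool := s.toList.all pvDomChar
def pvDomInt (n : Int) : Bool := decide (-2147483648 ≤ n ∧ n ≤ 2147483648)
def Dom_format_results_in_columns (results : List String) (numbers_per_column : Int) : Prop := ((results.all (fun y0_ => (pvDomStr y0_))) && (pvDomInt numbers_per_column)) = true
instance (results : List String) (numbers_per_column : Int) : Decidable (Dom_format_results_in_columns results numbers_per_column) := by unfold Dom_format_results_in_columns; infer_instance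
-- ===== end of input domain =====

-- B drops A's intermediate chunks list and reads each output row off directly as
-- the strided slice results[i::numbers_per_column]; same return value, idiomatic rewrite.

-- ===== PORT A =====
-- chunks = [results[i:i + n] for i in range(0, len(results), n)]
def pvChunks (results : List String) (numbers_per_column : Int) : List (List String) :=
  (PySem.List.pyRange 0 (results.length : Int) numbers_per_column).map
    (fun i => PySem.List.slice results (some i) (some (i + numbers_per_column)))

-- inner loop: column = []; for chunk in chunks: if i < len(chunk): column.append(chunk[i])
def pvColumn (chunks : List (List String)) (i : Int) : List String :=
  chunks.foldl
    (fun column chunk =>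
      if i < (chunk.length : Int) then column ++ [PySem.List.pyGetD chunk i ""] else column)
    []

def format_results_in_columns (results : List String) (numbers_per_column : Int) : String :=
  PySem.Str.join "\n"
    ((PySem.List.pyRange 0 numbers_per_column 1).foldl
      (fun formatted_results i =>
        formatted_results ++ [PySem.Str.join "   " (pvColumn (pvChunks results numbers_per_column) i)])
      [])

-- ===== PORT B =====
-- results[i::n]; inside the comprehension 0 ≤ i < n so the step n is never 0 and
-- slice? is always `some` there — .getD [] only totalises the expression.
def pvRow (results : List String) (numbers_per_column : Int) (i : Int) : List String :=
  (PySem.List.slice? results (some i) none numbers_per_column).getD []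

def format_results_in_columns_alt (results : List String) (numbers_per_column : Int) : String :=
  PySem.Str.join "\n"
    ((PySem.List.pyRange 0 numbers_per_column 1).map
      (fun i => PySem.Str.join "   " (pvRow results numbers_per_column i)))

-- ===== PRECONDITION & SPEC =====
-- A raises ValueError when numbers_per_column == 0 (range() step 0); excluded.
def Pre_format_results_in_columns (results : List String) (numbers_per_column : Int) : Prop :=
  numbers_per_column ≠ 0
instance (results : List String) (numbers_per_column : Int) : Decidable (Pre_format_results_in_columns results numbers_per_column) := by unfold Pre_format_results_in_columns; infer_instance

def pvWitness_format_results_in_columns : List String × Int := (["a", "bb", "c"], 2)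

def Spec_format_results_in_columns (results : List String) (numbers_per_column : Int) (out : String) : Prop := out = format_results_in_columns_alt results numbers_per_column
instance (results : List String) (numbers_per_column : Int) (out : String) : Decidable (Spec_format_results_in_columns results numbers_per_column out) := by unfold Spec_format_results_in_columns; infer_instance

-- ===== CLAIM (what is proved, stated in full; the proofs are below) =====
def Claim_equal_format_results_in_columns : Prop := ∀ (results : List String) (numbers_per_column : Int), Dom_format_results_in_columns results numbers_per_column → Pre_format_results_in_columns results numbers_per_column → Spec_format_results_in_columns results numbers_per_column (format_results_in_columns results numbers_per_column)

-- ===== LEMMAS AND PROOFS =====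

-- A's inner loop collects exactly the defined chunk[i]'s (accumulator-generalised).
theorem pvColumn_aux (i : Int) (chunks : List (List String)) (acc : List String) :
    chunks.foldl
      (fun column chunk =>
        if i < (chunk.length : Int) then column ++ [PySem.List.pyGetD chunk i ""] else column)
      acc
    = acc ++ chunks.filterMap
        (fun cc => if i < (cc.length : Int) then some (PySem.List.pyGetD cc i "") else none) := by
  induction chunks generalizing acc with
  | nil => simp
  | cons chead ctail ih =>
    simp only [List.foldl_cons, List.filterMap_cons]
    split_ifs with h
    · rw [ih]; simp
    · rw [ih]

theorem pvColumn_eq_filterMap (chunks : List (List String)) (i : Int) :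
    pvColumn chunks i =
      chunks.filterMap
        (fun cc => if i < (cc.length : Int) then some (PySem.List.pyGetD cc i "") else none) := by
  rw [pvColumn, pvColumn_aux, List.nil_append]

-- the branch test of A's inner loop is exactly definedness of ys[I]?
theorem pvIf_eq_getElem (ys : List String) (I : Nat) :
    (if (I : Int) < (ys.length : Int) then some (PySem.List.pyGetD ys (I : Int) "") else none)
      = ys[I]? := by
  by_cases h : I < ys.length
  · simp [Int.ofNat_lt.mpr h, PySem.List.pyGetD_natCast, List.getElem?_eq_getElem h]
  · have h2 : ys[I]? = none := List.getElem?_eq_none (by omega)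
    rw [if_neg (by exact_mod_cast h), h2]

-- k ≥ ceil(x/N) → x ≤ N*k
theorem pvCeil_bound (x N k : Nat) (hN : 0 < N) (hk : (x + N - 1) / N ≤ k) : x ≤ N * k := by
  have h1 := Nat.div_add_mod (x + N - 1) N
  have h2 := Nat.mod_lt (x + N - 1) hN
  have h3 : N * ((x + N - 1) / N) ≤ N * k := Nat.mul_le_mul_left N hk
  set q := (x + N - 1) / N with hq
  set t := N * q with ht
  omega

theorem pvFilterMap_range_stable {β : Type} (f : Nat → Option β) (M1 M2 : Nat)
    (h : M1 ≤ M2) (hn : ∀ k, M1 ≤ k → f k = none) :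
    (List.range M2).filterMap f = (List.range M1).filterMap f := by
  induction M2 with
  | zero => have h0 : M1 = 0 := by omega
            subst h0; rfl
  | succ m ih =>
    by_cases hm : M1 = m + 1
    · subst hm; rfl
    · rw [List.range_succ, List.filterMap_append, ih (by omega)]
      simp [hn m (by omega)]

-- B's strided slice results[I::N], reduced to an explicit filterMap over indices.
theorem pvRow_eq (xs : List String) (N I : Nat) (hN : 0 < N) :
    pvRow xs (N : Int) (I : Int)
      = (List.range (if I < xs.length then (xs.length - I + N - 1) / N else 0)).filterMap
          (fun k => xs[I + N * k]?) := by
  have hsz : ((N : Int) = 0) = False := by simp; omega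
  rw [pvRow]
  simp only [PySem.List.slice?, PySem.List.sliceIndices, hsz, if_false]
  rw [if_neg (show ¬ (I:Int) < 0 by omega), if_pos (show (0:Int) < (N:Int) by exact_mod_cast hN)]
  simp only [if_neg (show ¬ (N:Int) < 0 by omega)]
  by_cases hIL : I < xs.length
  · have hmin : min (I:Int) (xs.length:Int) = (I:Int) := by omega
    rw [hmin, if_pos (show (I:Int) < (xs.length:Int) by exact_mod_cast hIL), if_pos hIL]
    have h1 : ((xs.length : Int) - I + N - 1) = ((xs.length - I + N - 1 : Nat) : Int) := by omega
    rw [h1, Int.ofNat_ediv_ofNat, Int.toNat_natCast, Option.getD_some]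
    refine congrArg₂ _ (funext fun k => ?_) rfl
    have h2 : ((I : Int) + N * k).toNat = I + N * k := by omega
    rw [h2]
  · have hmin : min (I:Int) (xs.length:Int) = (xs.length:Int) := by omega
    rw [hmin, if_neg (lt_irrefl _), if_neg hIL]
    simp

-- one chunk entry, as an index into the original list
theorem pvChunk_entry (xs : List String) (N I k : Nat) (hI : I < N) :
    (List.take N (List.drop (N * k) xs))[I]? = xs[N * k + I]? := by
  rw [List.getElem?_take, if_pos hI, List.getElem?_drop]

theorem pvCol_eq_row (xs : List String) (N I : Nat) (hN : 0 < N) (hI : I < N) :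
    pvColumn (pvChunks xs (N : Int)) (I : Int) = pvRow xs (N : Int) (I : Int) := by
  rw [pvColumn_eq_filterMap, pvChunks,
    PySem.List.pyRange_of_pos 0 (xs.length : Int) (show (0:Int) < (N:Int) by exact_mod_cast hN),
    pvRow_eq xs N I hN]
  have hlist : List.map (fun i => PySem.List.slice xs (some i) (some (i + (N:Int))))
      (List.map (fun k : Nat => 0 + (N:Int) * (k:Int))
        (List.range (if (0:Int) < ((xs.length:Int) - 0) then (((xs.length:Int) - 0 + N - 1) / N).toNat else 0)))
      = List.map (fun k : Nat => List.take N (List.drop (N * k) xs))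
        (List.range (if (0:Int) < ((xs.length:Int) - 0) then (((xs.length:Int) - 0 + N - 1) / N).toNat else 0)) := by
    rw [List.map_map]
    refine List.map_congr_left fun k _ => ?_
    simp only [Function.comp_apply]
    have e1 : (0 + (N:Int) * (k:Int)) = ((N * k : Nat) : Int) := by push_cast; ring
    rw [e1]
    have e2 : (((N * k : Nat) : Int) + (N:Int)) = ((N * k + N : Nat) : Int) := by push_cast; ring
    rw [e2, PySem.List.slice_natCast, show N * k + N - N * k = N from by omega]
  rw [show ((xs.length:Int) - 0) = (xs.length:Int) from by ring] at hlist ⊢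
  rw [hlist, List.filterMap_map]
  have hfun : ((fun cc => if (I:Int) < (cc.length : Int) then some (PySem.List.pyGetD cc (I:Int) "") else none) ∘
      (fun k : Nat => List.take N (List.drop (N * k) xs))) = (fun k : Nat => xs[N * k + I]?) := by
    funext k
    simp only [Function.comp_apply]
    rw [pvIf_eq_getElem, pvChunk_entry xs N I k hI]
  rw [hfun]
  have hswap : (fun k : Nat => xs[I + N * k]?) = (fun k : Nat => xs[N * k + I]?) := by
    funext k; rw [Nat.add_comm]
  rw [hswap]
  by_cases hIL : I < xs.length
  · have hL : (0:Int) < (xs.length : Int) := by exact_mod_cast (by omega : 0 < xs.length)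
    rw [if_pos hL, if_pos hIL]
    have h1 : ((xs.length : Int) + N - 1) = ((xs.length + N - 1 : Nat) : Int) := by omega
    rw [h1, Int.ofNat_ediv_ofNat, Int.toNat_natCast]
    refine pvFilterMap_range_stable _ _ _ (Nat.div_le_div_right (by omega)) ?_
    intro k hk
    have hceil := pvCeil_bound (xs.length - I) N k hN hk
    refine List.getElem?_eq_none ?_
    set t := N * k with ht
    omega
  · rw [if_neg hIL]
    simp only [List.range_zero, List.filterMap_nil]
    rw [List.filterMap_eq_nil_iff]
    intro k _
    refine List.getElem?_eq_none ?_
    have hle : I ≤ N * k + I := Nat.le_add_left I (N * k)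
    omega

-- ===== VERDICT (by name: the statement is the Claim_ definition above) =====
theorem format_results_in_columns_spec : Claim_equal_format_results_in_columns := by
  intro results n _ hpre
  unfold Spec_format_results_in_columns format_results_in_columns format_results_in_columns_alt
  rw [PySem.List.foldl_append_singleton_eq_map, List.nil_append]
  refine congrArg _ (List.map_congr_left ?_)
  intro i hi
  rw [PySem.List.mem_pyRange_one] at hi
  have hn : 0 < n := lt_of_le_of_lt hi.1 hi.2
  refine congrArg _ ?_
  have hieq : i = ((i.toNat : Nat) : Int) := (Int.toNat_of_nonneg hi.1).symm
  have hneq : n = ((n.toNat : Nat) : Int) := (Int.toNat_of_nonneg hn.le).symm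
  rw [hieq, hneq]
  exact pvCol_eq_row results n.toNat i.toNat (by omega) (by omega)
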